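-- pv_equiv track=rewrite | github.com/nicolasfredesfranco/CV_2 | refactor_generator.py | organize_by_sections
-- ===== SOURCE A (Python) =====
-- def organize_by_sections(elements):
--     """Organize elements into hierarchical structure by Y position and content."""
--
--     # Contact info: y > 668
--     contact = [e for e in elements if e.get('y', 0) > 668]
--
--     # Education section: 440 < y <= 668 and x < 200
--     education = [e for e in elements if 440 < e.get('y', 0) <= 668 and e.get('x', 0) < 200]
--
--     # Skills section: 107 < y <= 440 and x < 200
--     skills = [e for e in elements if 107 < e.get('y', 0) <= 440 and e.get('x', 0) < 200]
--
--     # Languages section: y <= 107 and x < 200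
--     languages = [e for e in elements if e.get('y', 0) <= 107 and e.get('x', 0) < 200]
--
--     # Right column header name: y > 710 and x >= 200
--     header_name = [e for e in elements if e.get('y', 0) > 710 and e.get('x', 0) >= 200]
--
--     # Experience section: 92 < y <= 710 and x >= 200
--     experience = [e for e in elements if 92 < e.get('y', 0) <= 710 and e.get('x', 0) >= 200]
--
--     # Papers section: y <= 92 and x >= 200
--     papers = [e for e in elements if e.get('y', 0) <= 92 and e.get('x', 0) >= 200]
--
--     return {
--         'contact': contact,
--         'education': education,
--         'skills': skills,
--         'languages': languages,
--         'header_name': header_name,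
--         'experience': experience,
--         'papers': papers
--     }
-- ===== SOURCE B (Python) =====
-- def organize_by_sections(elements):
--     """Organize elements via a per-column decision tree.
--
--     Insight: within each column (x < 200 vs x >= 200) the y-thresholds
--     partition the axis, so one elif chain routes each element to exactly
--     one column bucket; 'contact' is the only overlapping bucket and is
--     handled as a separate overlay check.
--     """
--     contact, education, skills, languages = [], [], [], []
--     header_name, experience, papers = [], [], []
--     for e in elements:
--         y = e.get('y', 0)
--         x = e.get('x', 0)
--         if y > 668:
--             contact.append(e)
--         if x < 200:
--             # left column: languages | skills | education partition y <= 668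
--             if y <= 107:
--                 languages.append(e)
--             elif y <= 440:
--                 skills.append(e)
--             elif y <= 668:
--                 education.append(e)
--             # y > 668 in the left column belongs only to contact
--         else:
--             # right column: papers | experience | header_name partition all y
--             if y <= 92:
--                 papers.append(e)
--             elif y <= 710:
--                 experience.append(e)
--             else:
--                 header_name.append(e)
--     return {
--         'contact': contact,
--         'education': education,
--         'skills': skills,
--         'languages': languages,
--         'header_name': header_name,
--         'experience': experience,
--         'papers': papers
--     }
-- ===== Notes on version B (the rewrite author's own statement) =====
-- stated objective: alternative
-- what changed: Replaces seven independent interval predicates scanned over the list seven times by one pass with a per-column decision tree: x selects the column, an elif chain on y routes each element to the single partition bucket of that column (3 comparisons instead of ~14), with 'contact' as the only overlay check.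
import Mathlib
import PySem

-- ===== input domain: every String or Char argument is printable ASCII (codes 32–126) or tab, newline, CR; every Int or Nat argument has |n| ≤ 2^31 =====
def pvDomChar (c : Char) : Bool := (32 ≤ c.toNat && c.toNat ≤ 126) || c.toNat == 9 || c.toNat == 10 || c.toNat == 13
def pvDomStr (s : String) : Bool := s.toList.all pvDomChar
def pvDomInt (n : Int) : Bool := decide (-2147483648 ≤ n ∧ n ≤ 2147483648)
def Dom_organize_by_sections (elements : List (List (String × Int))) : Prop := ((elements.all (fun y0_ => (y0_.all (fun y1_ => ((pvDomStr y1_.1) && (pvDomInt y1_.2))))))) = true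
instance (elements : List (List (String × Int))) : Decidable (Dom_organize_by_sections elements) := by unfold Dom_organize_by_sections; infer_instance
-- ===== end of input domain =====

-- B replaces A's seven interval-predicate scans by one pass with a per-column decision tree (an elif chain on y routes each element to its column's unique partition bucket; contact is the only overlay); alternative decomposition, same return value.

-- ===== PORT A =====
-- e.get(k, 0): first-match lookup in the association list, default 0 (shared helper; both Pythons use dict.get)
def pyGetDef (e : List (String × Int)) (k : String) : Int :=
  match e.find? (fun p => p.1 == k) with
  | some p => p.2
  | none => 0

def organize_by_sections (elements : List (List (String × Int))) : List (String × List (List (String × Int))) :=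
  let contact := elements.filter (fun e => decide (668 < pyGetDef e "y"))
  let education := elements.filter (fun e => decide (440 < pyGetDef e "y" ∧ pyGetDef e "y" ≤ 668 ∧ pyGetDef e "x" < 200))
  let skills := elements.filter (fun e => decide (107 < pyGetDef e "y" ∧ pyGetDef e "y" ≤ 440 ∧ pyGetDef e "x" < 200))
  let languages := elements.filter (fun e => decide (pyGetDef e "y" ≤ 107 ∧ pyGetDef e "x" < 200))
  let header_name := elements.filter (fun e => decide (710 < pyGetDef e "y" ∧ 200 ≤ pyGetDef e "x"))
  let experience := elements.filter (fun e => decide (92 < pyGetDef e "y" ∧ pyGetDef e "y" ≤ 710 ∧ 200 ≤ pyGetDef e "x"))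
  let papers := elements.filter (fun e => decide (pyGetDef e "y" ≤ 92 ∧ 200 ≤ pyGetDef e "x"))
  [("contact", contact), ("education", education), ("skills", skills), ("languages", languages),
   ("header_name", header_name), ("experience", experience), ("papers", papers)]

-- ===== PORT B =====
abbrev ObsState := List (List (String × Int)) × List (List (String × Int)) × List (List (String × Int)) ×
  List (List (String × Int)) × List (List (String × Int)) × List (List (String × Int)) × List (List (String × Int))

-- one step of B's loop: the contact overlay check, then the per-column decision tree
def obsStep (s : ObsState) (e : List (String × Int)) : ObsState :=
  let y := pyGetDef e "y"
  let x := pyGetDef e "x"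
  let (c, ed, sk, la, hn, ex, pa) := s
  let c := if 668 < y then c ++ [e] else c
  if x < 200 then
    -- left column: languages | skills | education partition y ≤ 668; y > 668 belongs only to contact
    if y ≤ 107 then (c, ed, sk, la ++ [e], hn, ex, pa)
    else if y ≤ 440 then (c, ed, sk ++ [e], la, hn, ex, pa)
    else if y ≤ 668 then (c, ed ++ [e], sk, la, hn, ex, pa)
    else (c, ed, sk, la, hn, ex, pa)
  else
    -- right column: papers | experience | header_name partition all y
    if y ≤ 92 then (c, ed, sk, la, hn, ex, pa ++ [e])
    else if y ≤ 710 then (c, ed, sk, la, hn, ex ++ [e], pa)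
    else (c, ed, sk, la, hn ++ [e], ex, pa)

def organize_by_sections_alt (elements : List (List (String × Int))) : List (String × List (List (String × Int))) :=
  let (c, ed, sk, la, hn, ex, pa) := elements.foldl obsStep ([], [], [], [], [], [], [])
  [("contact", c), ("education", ed), ("skills", sk), ("languages", la),
   ("header_name", hn), ("experience", ex), ("papers", pa)]

-- ===== PRECONDITION & SPEC =====
def Spec_organize_by_sections (elements : List (List (String × Int))) (out : List (String × List (List (String × Int)))) : Prop := out = organize_by_sections_alt elements
instance (elements : List (List (String × Int))) (out : List (String × List (List (String × Int)))) : Decidable (Spec_organize_by_sections elements out) := by unfold Spec_organize_by_sections; infer_instance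

-- ===== CLAIM (what is proved, stated in full; the proofs are below) =====
def Claim_equal_organize_by_sections : Prop := ∀ (elements : List (List (String × Int))), Dom_organize_by_sections elements → Spec_organize_by_sections elements (organize_by_sections elements)

-- ===== LEMMAS AND PROOFS =====
-- Bool predicates describing which leaf of B's decision tree an element reaches
def pC (e : List (String × Int)) : Bool := decide (668 < pyGetDef e "y")
def pLa (e : List (String × Int)) : Bool := decide (pyGetDef e "x" < 200) && decide (pyGetDef e "y" ≤ 107)
def pSk (e : List (String × Int)) : Bool := decide (pyGetDef e "x" < 200) && !decide (pyGetDef e "y" ≤ 107) && decide (pyGetDef e "y" ≤ 440)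
def pEd (e : List (String × Int)) : Bool := decide (pyGetDef e "x" < 200) && !decide (pyGetDef e "y" ≤ 107) && !decide (pyGetDef e "y" ≤ 440) && decide (pyGetDef e "y" ≤ 668)
def pPa (e : List (String × Int)) : Bool := !decide (pyGetDef e "x" < 200) && decide (pyGetDef e "y" ≤ 92)
def pEx (e : List (String × Int)) : Bool := !decide (pyGetDef e "x" < 200) && !decide (pyGetDef e "y" ≤ 92) && decide (pyGetDef e "y" ≤ 710)
def pHn (e : List (String × Int)) : Bool := !decide (pyGetDef e "x" < 200) && !decide (pyGetDef e "y" ≤ 92) && !decide (pyGetDef e "y" ≤ 710)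

-- the fold accumulates exactly the tree-leaf filters
theorem obs_foldl (xs : List (List (String × Int))) (c ed sk la hn ex pa : List (List (String × Int))) :
    xs.foldl obsStep (c, ed, sk, la, hn, ex, pa) =
      (c ++ xs.filter pC, ed ++ xs.filter pEd, sk ++ xs.filter pSk, la ++ xs.filter pLa,
       hn ++ xs.filter pHn, ex ++ xs.filter pEx, pa ++ xs.filter pPa) := by
  induction xs generalizing c ed sk la hn ex pa with
  | nil => simp
  | cons h t ih =>
    simp only [List.foldl_cons, obsStep]
    split_ifs with h0 h1 h2 h3 h4 <;>
      rw [ih] <;>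
      simp [pC, pEd, pSk, pLa, pHn, pEx, pPa, *]

-- each tree-leaf predicate coincides with A's interval predicate
theorem pEd_eq (e : List (String × Int)) :
    pEd e = decide (440 < pyGetDef e "y" ∧ pyGetDef e "y" ≤ 668 ∧ pyGetDef e "x" < 200) := by
  unfold pEd
  rw [Bool.eq_iff_iff]
  simp only [Bool.and_eq_true, Bool.not_eq_true', decide_eq_true_eq, decide_eq_false_iff_not]
  omega

theorem pSk_eq (e : List (String × Int)) :
    pSk e = decide (107 < pyGetDef e "y" ∧ pyGetDef e "y" ≤ 440 ∧ pyGetDef e "x" < 200) := by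
  unfold pSk
  rw [Bool.eq_iff_iff]
  simp only [Bool.and_eq_true, Bool.not_eq_true', decide_eq_true_eq, decide_eq_false_iff_not]
  omega

theorem pLa_eq (e : List (String × Int)) :
    pLa e = decide (pyGetDef e "y" ≤ 107 ∧ pyGetDef e "x" < 200) := by
  unfold pLa
  rw [Bool.eq_iff_iff]
  simp only [Bool.and_eq_true, decide_eq_true_eq]
  omega

theorem pHn_eq (e : List (String × Int)) :
    pHn e = decide (710 < pyGetDef e "y" ∧ 200 ≤ pyGetDef e "x") := by
  unfold pHn
  rw [Bool.eq_iff_iff]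
  simp only [Bool.and_eq_true, Bool.not_eq_true', decide_eq_true_eq, decide_eq_false_iff_not]
  omega

theorem pEx_eq (e : List (String × Int)) :
    pEx e = decide (92 < pyGetDef e "y" ∧ pyGetDef e "y" ≤ 710 ∧ 200 ≤ pyGetDef e "x") := by
  unfold pEx
  rw [Bool.eq_iff_iff]
  simp only [Bool.and_eq_true, Bool.not_eq_true', decide_eq_true_eq, decide_eq_false_iff_not]
  omega

theorem pPa_eq (e : List (String × Int)) :
    pPa e = decide (pyGetDef e "y" ≤ 92 ∧ 200 ≤ pyGetDef e "x") := by
  unfold pPa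
  rw [Bool.eq_iff_iff]
  simp only [Bool.and_eq_true, Bool.not_eq_true', decide_eq_true_eq, decide_eq_false_iff_not]
  omega

-- ===== VERDICT (by name: the statement is the Claim_ definition above) =====
theorem organize_by_sections_spec : Claim_equal_organize_by_sections := by
  intro elements _
  unfold Spec_organize_by_sections organize_by_sections organize_by_sections_alt
  rw [obs_foldl]
  simp only [List.nil_append]
  have hC : ∀ xs : List (List (String × Int)),
      xs.filter (fun e => decide (668 < pyGetDef e "y")) = xs.filter pC := by
    intro xs; exact List.filter_congr (fun e _ => by simp [pC])
  rw [hC, List.filter_congr (l := elements) (fun e _ => (pEd_eq e).symm),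
      List.filter_congr (l := elements) (fun e _ => (pSk_eq e).symm),
      List.filter_congr (l := elements) (fun e _ => (pLa_eq e).symm),
      List.filter_congr (l := elements) (fun e _ => (pHn_eq e).symm),
      List.filter_congr (l := elements) (fun e _ => (pEx_eq e).symm),
      List.filter_congr (l := elements) (fun e _ => (pPa_eq e).symm)]
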